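-- pv_equiv track=rewrite | github.com/bsoyka/roboben | bot/utils/pagination.py | _split_remaining_words
-- ===== SOURCE A (Python) =====
-- import typing as t
--
-- def _split_remaining_words(line: str, max_chars: int) -> t.Tuple[str, t.Optional[str]]:
--     """Splits a line into two strings: reduced_words and remaining_words.
--
--     reduced_words: the remaining words in `line`, after attempting to remove
--         all words that exceed `max_chars` (rounding down to the nearest word
--         boundary).
--     remaining_words: the words in `line` which exceed `max_chars`. This
--         value is None if no words could be split from `line`.
--
--     If there are any remaining_words, an ellipses is appended to
--     reduced_words and a continuation header is inserted before
--     remaining_words to visually communicate the line continuation.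
--
--     Returns a tuple in the format (reduced_words, remaining_words).
--     """
--     reduced_words = []
--     remaining_words = []
--
--     # "(Continued)" is used on a line by itself to indicate the continuation of last page
--     continuation_header = "(Continued)\n-----------\n"
--     reduced_char_count = 0
--     is_full = False
--
--     for word in line.split(" "):
--         if is_full:
--             remaining_words.append(word)
--
--         elif len(word) + reduced_char_count <= max_chars:
--             reduced_words.append(word)
--             reduced_char_count += len(word) + 1
--         else:
--             # If reduced_words is empty, we were unable to split the words across pages
--             if not reduced_words:
--                 return line, None
--             is_full = True
--             remaining_words.append(word)
--     return (
--         " ".join(reduced_words) + "..." if remaining_words else "",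
--         continuation_header + " ".join(remaining_words) if remaining_words else None,
--     )
-- ===== SOURCE B (Python) =====
-- import typing as t
--
-- def _split_remaining_words(line: str, max_chars: int) -> t.Tuple[str, t.Optional[str]]:
--     """Cut-index reformulation: find how many leading words fit, then slice."""
--     words = line.split(" ")
--     used = 0
--     i = 0
--     for word in words:
--         if len(word) + used > max_chars:
--             break
--         used += len(word) + 1
--         i += 1
--     if i == 0:
--         return line, None
--     if i == len(words):
--         return "", None
--     return (
--         " ".join(words[:i]) + "...",
--         "(Continued)\n-----------\n" + " ".join(words[i:]),
--     )
-- ===== Notes on version B (the rewrite author's own statement) =====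
-- stated objective: simpler
-- what changed: B replaces A's four-variable state machine (two accumulator lists, a running count and an is_full flag with an early return inside the loop) by computing a single cut index of fitting leading words and then slicing/joining the word list once.
import Mathlib
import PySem

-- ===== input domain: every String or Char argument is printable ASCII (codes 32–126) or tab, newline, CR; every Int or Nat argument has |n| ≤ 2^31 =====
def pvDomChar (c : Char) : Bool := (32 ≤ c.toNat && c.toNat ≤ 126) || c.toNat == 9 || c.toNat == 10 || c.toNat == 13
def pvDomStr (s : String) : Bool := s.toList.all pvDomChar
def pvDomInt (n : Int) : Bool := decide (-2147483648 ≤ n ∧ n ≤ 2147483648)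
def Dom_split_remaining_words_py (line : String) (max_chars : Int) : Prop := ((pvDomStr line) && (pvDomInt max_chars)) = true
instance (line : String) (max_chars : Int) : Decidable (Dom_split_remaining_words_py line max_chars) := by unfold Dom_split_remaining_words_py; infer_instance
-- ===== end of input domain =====

-- B replaces A's state machine (two accumulators, running count, is_full flag, early return)
-- by computing the cut index of fitting leading words and slicing the word list once (objective: simpler).

-- ===== PORT A =====
def pvHeader : List Char := "(Continued)\n-----------\n".toList

-- A's for-loop: state (reduced_words, remaining_words, reduced_char_count, is_full);
-- the early `return line, None` inside the loop is modelled as the `none` result.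
def pvLoopA (max_chars : Int) : List (List Char) → List (List Char) → List (List Char) →
    Int → Bool → Option (List (List Char) × List (List Char))
  | [], reduced, remaining, _, _ => some (reduced, remaining)
  | w :: ws, reduced, remaining, cnt, is_full =>
    if is_full then
      pvLoopA max_chars ws reduced (remaining ++ [w]) cnt is_full
    else if (w.length : Int) + cnt ≤ max_chars then
      pvLoopA max_chars ws (reduced ++ [w]) remaining (cnt + w.length + 1) is_full
    else if reduced = [] then none
    else pvLoopA max_chars ws reduced (remaining ++ [w]) cnt true

def split_remaining_words_py (line : String) (max_chars : Int) : String × Option String :=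
  match pvLoopA max_chars (PySem.Chars.splitOn line.toList [' ']) [] [] 0 false with
  | none => (line, none)
  | some (reduced, remaining) =>
    (if remaining ≠ [] then String.ofList (PySem.Chars.join [' '] reduced ++ "...".toList) else "",
     if remaining ≠ [] then some (String.ofList (pvHeader ++ PySem.Chars.join [' '] remaining)) else none)

-- ===== PORT B =====
def pvHeaderB : List Char := "(Continued)\n-----------\n".toList

-- B's scan: the number of leading words whose cumulative len(word)+1 budget fits.
def pvCutIdx (max_chars : Int) : List (List Char) → Int → Nat
  | [], _ => 0
  | w :: ws, used =>
    if (w.length : Int) + used > max_chars then 0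
    else pvCutIdx max_chars ws (used + w.length + 1) + 1

def pvSliceOut (line : String) (words : List (List Char)) (i : Nat) : String × Option String :=
  if i = 0 then (line, none)
  else if i = words.length then ("", none)
  else (String.ofList (PySem.Chars.join [' '] (words.take i) ++ "...".toList),
        some (String.ofList (pvHeaderB ++ PySem.Chars.join [' '] (words.drop i))))

def split_remaining_words_py_alt (line : String) (max_chars : Int) : String × Option String :=
  let words := PySem.Chars.splitOn line.toList [' ']
  pvSliceOut line words (pvCutIdx max_chars words 0)

-- ===== PRECONDITION & SPEC =====
def Spec_split_remaining_words_py (line : String) (max_chars : Int) (out : String × Option String) : Prop := out = split_remaining_words_py_alt line max_chars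
instance (line : String) (max_chars : Int) (out : String × Option String) : Decidable (Spec_split_remaining_words_py line max_chars out) := by unfold Spec_split_remaining_words_py; infer_instance

-- ===== CLAIM (what is proved, stated in full; the proofs are below) =====
def Claim_equal_split_remaining_words_py : Prop := ∀ (line : String) (max_chars : Int), Dom_split_remaining_words_py line max_chars → Spec_split_remaining_words_py line max_chars (split_remaining_words_py line max_chars)

-- ===== LEMMAS AND PROOFS =====

theorem pvSplitOn_go_ne_nil (sep : List Char) (fuel : Nat) (l cur : List Char)
    (acc : List (List Char)) : PySem.Chars.splitOn.go sep fuel l cur acc ≠ [] := by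
  induction fuel generalizing l cur acc with
  | zero => simp [PySem.Chars.splitOn.go]
  | succ fuel ih =>
    cases l with
    | nil => simp [PySem.Chars.splitOn.go]
    | cons c rest =>
      rw [PySem.Chars.splitOn.go]
      split
      · exact ih _ _ _
      · exact ih _ _ _

theorem pvSplitOn_ne_nil (s sep : List Char) : PySem.Chars.splitOn s sep ≠ [] := by
  unfold PySem.Chars.splitOn
  exact pvSplitOn_go_ne_nil _ _ _ _ _

theorem pvCutIdx_le (max_chars : Int) (ws : List (List Char)) (used : Int) :
    pvCutIdx max_chars ws used ≤ ws.length := by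
  induction ws generalizing used with
  | nil => simp [pvCutIdx]
  | cons w ws ih =>
    rw [pvCutIdx]
    split
    · simp
    · simpa using ih (used + w.length + 1)

theorem pvLoopA_full (max_chars : Int) (ws : List (List Char)) (red rem : List (List Char))
    (cnt : Int) : pvLoopA max_chars ws red rem cnt true = some (red, rem ++ ws) := by
  induction ws generalizing rem with
  | nil => simp [pvLoopA]
  | cons w ws ih => rw [pvLoopA]; simp [ih]

theorem pvLoopA_cut (max_chars : Int) (ws : List (List Char)) (red rem : List (List Char))
    (cnt : Int) (hred : red ≠ []) :
    pvLoopA max_chars ws red rem cnt false =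
      some (red ++ ws.take (pvCutIdx max_chars ws cnt),
            rem ++ ws.drop (pvCutIdx max_chars ws cnt)) := by
  induction ws generalizing red rem cnt with
  | nil => simp [pvLoopA, pvCutIdx]
  | cons w ws ih =>
    rw [pvLoopA, pvCutIdx]
    by_cases hfit : (w.length : Int) + cnt ≤ max_chars
    · have hgt : ¬ ((w.length : Int) + cnt > max_chars) := by omega
      simp only [if_neg Bool.false_ne_true, if_pos hfit, if_neg hgt]
      rw [ih (red ++ [w]) rem (cnt + w.length + 1) (by simp)]
      simp
    · have hgt : (w.length : Int) + cnt > max_chars := by omega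
      simp only [if_neg Bool.false_ne_true, if_neg hfit, if_neg hred, if_pos hgt]
      rw [pvLoopA_full]
      simp

-- ===== VERDICT (by name: the statement is the Claim_ definition above) =====
theorem split_remaining_words_py_spec : Claim_equal_split_remaining_words_py := by
  intro line max_chars _
  simp only [Spec_split_remaining_words_py, split_remaining_words_py, split_remaining_words_py_alt, pvSliceOut]
  rcases hw : PySem.Chars.splitOn line.toList [' '] with _ | ⟨w, ws⟩
  · exact absurd hw (pvSplitOn_ne_nil _ _)
  · rw [pvLoopA, pvCutIdx]
    by_cases hfit : (w.length : Int) + 0 ≤ max_chars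
    · have hgt : ¬ ((w.length : Int) + 0 > max_chars) := by omega
      simp only [if_neg Bool.false_ne_true, if_pos hfit, if_neg hgt, List.nil_append]
      rw [pvLoopA_cut max_chars ws [w] [] (0 + w.length + 1) (by simp)]
      have hle := pvCutIdx_le max_chars ws (0 + w.length + 1)
      set i := pvCutIdx max_chars ws (0 + w.length + 1) with hi
      have h0 : ¬ (i + 1 = 0) := by omega
      simp only [if_neg h0]
      by_cases hfull : i = ws.length
      · simp [hfull]
      · have hlt : i < ws.length := lt_of_le_of_ne hle hfull
        have hne : ws.drop i ≠ [] := by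
          simp [List.drop_eq_nil_iff]; omega
        simp [hne, hfull, List.take_succ_cons, List.drop_succ_cons, pvHeader, pvHeaderB]
    · have h1 : ¬ ((w.length : Int) ≤ max_chars) := by omega
      have h2 : max_chars < (w.length : Int) := by omega
      simp [h1, h2]
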